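-- pv_equiv track=rewrite | github.com/karen/advent-of-code-2017 | aoc3.py | sum_adj_alt
-- ===== SOURCE A (Python) =====
-- def sum_adj_alt(m,r,c):
--     ans = 0
--     dx = [(-1,0), (0,-1), (0,1), (1,0), (-1,-1), (1,1), (-1,1), (1,-1)]
--     for d in dx:
--         rr = r + d[0]
--         cc = c + d[1]
--         if rr >= 0 and cc >= 0 and rr < len(m) and cc < len(m[0]):
--             ans += m[rr][cc]
--     return ans
-- ===== SOURCE B (Python) =====
-- def sum_adj_alt(m, r, c):
--     nr = len(m)
--     nc = len(m[0]) if m else 0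
--     total = 0
--     for i in range(max(0, r - 1), min(nr, r + 2)):
--         for j in range(max(0, c - 1), min(nc, c + 2)):
--             total += m[i][j]
--     if 0 <= r < nr and 0 <= c < nc:
--         total -= m[r][c]
--     return total
-- ===== Notes on version B (the rewrite author's own statement) =====
-- stated objective: alternative
-- what changed: B sums the whole clamped 3x3 block around (r,c) with two range loops and then subtracts the center value, instead of probing eight discrete neighbor offsets with a per-offset bounds guard.
-- outside the precondition, e.g. on sum_adj_alt([[1, 2], [3]], 1, 1): A returns 6, B raises IndexError
import Mathlib
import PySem

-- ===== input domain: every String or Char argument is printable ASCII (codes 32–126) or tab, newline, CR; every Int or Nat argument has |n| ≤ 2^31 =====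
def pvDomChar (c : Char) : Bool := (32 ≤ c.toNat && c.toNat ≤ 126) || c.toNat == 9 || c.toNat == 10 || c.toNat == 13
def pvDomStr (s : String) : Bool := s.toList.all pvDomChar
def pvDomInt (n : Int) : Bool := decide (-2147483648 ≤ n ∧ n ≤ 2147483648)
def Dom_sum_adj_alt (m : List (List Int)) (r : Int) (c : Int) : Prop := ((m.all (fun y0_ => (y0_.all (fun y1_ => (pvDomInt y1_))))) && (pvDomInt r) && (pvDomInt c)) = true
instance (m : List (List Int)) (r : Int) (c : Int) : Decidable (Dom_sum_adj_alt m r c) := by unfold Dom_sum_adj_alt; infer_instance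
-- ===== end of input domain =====

-- B replaces A's eight guarded offset probes by a clamped 3x3 block double loop minus the center (alternative decomposition, same cost).

-- ===== PORT A =====
-- literal port of A: fold over the eight offsets, guard each probe by A's bound
-- (A's column bound is len(m[0]) for EVERY row; m[rr][cc] is exact under Pre_, where every probed index is in range of its row)
def sum_adj_alt (m : List (List Int)) (r : Int) (c : Int) : Int :=
  ([(-1, 0), (0, -1), (0, 1), (1, 0), (-1, -1), (1, 1), (-1, 1), (1, -1)] : List (Int × Int)).foldl
    (fun ans d =>
      if r + d.1 ≥ 0 ∧ c + d.2 ≥ 0 ∧ r + d.1 < (m.length : Int) ∧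
          c + d.2 < ((PySem.List.pyGetD m 0 []).length : Int) then
        ans + PySem.List.pyGetD (PySem.List.pyGetD m (r + d.1) []) (c + d.2) 0
      else ans) 0

-- ===== PORT B =====
-- helper: `len(m[0]) if m else 0`
def pvNC (m : List (List Int)) : Int :=
  match m with
  | [] => 0
  | row :: _ => (row.length : Int)

def sum_adj_alt_alt (m : List (List Int)) (r : Int) (c : Int) : Int :=
  let nr : Int := m.length
  let nc : Int := pvNC m
  let total :=
    (PySem.List.pyRange (max 0 (r - 1)) (min nr (r + 2)) 1).foldl
      (fun acc i =>
        (PySem.List.pyRange (max 0 (c - 1)) (min nc (c + 2)) 1).foldl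
          (fun acc2 j => acc2 + PySem.List.pyGetD (PySem.List.pyGetD m i []) j 0) acc)
      0
  if 0 ≤ r ∧ r < nr ∧ 0 ≤ c ∧ c < nc then
    total - PySem.List.pyGetD (PySem.List.pyGetD m r []) c 0
  else total

-- ===== PRECONDITION & SPEC =====
-- Pre_ excludes ragged grids on which some 3x3-block cell passes the first-row-width bound but
-- exceeds its own row's length: there Python A either raises IndexError itself or (when only the
-- center cell is affected) returns a value while B's block loop raises, so no value is claimed.
def Pre_sum_adj_alt (m : List (List Int)) (r : Int) (c : Int) : Prop :=
  ∀ i ∈ ([r - 1, r, r + 1] : List Int), ∀ j ∈ ([c - 1, c, c + 1] : List Int),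
    (0 ≤ i ∧ i < (m.length : Int) ∧ 0 ≤ j ∧ j < pvNC m) →
      j < ((PySem.List.pyGetD m i []).length : Int)
instance (m : List (List Int)) (r : Int) (c : Int) : Decidable (Pre_sum_adj_alt m r c) := by
  unfold Pre_sum_adj_alt; infer_instance

def pvWitness_sum_adj_alt : List (List Int) × Int × Int := ([[1, 2], [3, 4]], 0, 0)

def Spec_sum_adj_alt (m : List (List Int)) (r : Int) (c : Int) (out : Int) : Prop := out = sum_adj_alt_alt m r c
instance (m : List (List Int)) (r : Int) (c : Int) (out : Int) : Decidable (Spec_sum_adj_alt m r c out) := by unfold Spec_sum_adj_alt; infer_instance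

-- ===== CLAIM (what is proved, stated in full; the proofs are below) =====
def Claim_equal_sum_adj_alt : Prop := ∀ (m : List (List Int)) (r : Int) (c : Int), Dom_sum_adj_alt m r c → Pre_sum_adj_alt m r c → Spec_sum_adj_alt m r c (sum_adj_alt m r c)

-- ===== LEMMAS AND PROOFS =====

-- the value of cell (i, j) as both loops see it: 0 outside the bounds both programs test
def pvCell (m : List (List Int)) (i j : Int) : Int :=
  if 0 ≤ i ∧ i < (m.length : Int) then
    (if 0 ≤ j ∧ j < pvNC m then PySem.List.pyGetD (PySem.List.pyGetD m i []) j 0 else 0)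
  else 0

theorem pvLen0 (m : List (List Int)) : ((PySem.List.pyGetD m 0 []).length : Int) = pvNC m := by
  cases m <;> simp [PySem.List.pyGetD_zero, pvNC]

-- one probe of A equals adding a cell
theorem pvStep (m : List (List Int)) (x i j : Int) :
    (if i ≥ 0 ∧ j ≥ 0 ∧ i < (m.length : Int) ∧ j < ((PySem.List.pyGetD m 0 []).length : Int) then
        x + PySem.List.pyGetD (PySem.List.pyGetD m i []) j 0
      else x) = x + pvCell m i j := by
  rw [pvLen0]; unfold pvCell
  generalize pvNC m = w
  split_ifs <;> first | ring1 | (exfalso; omega)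

theorem pvA_eq (m : List (List Int)) (r c : Int) :
    sum_adj_alt m r c =
      pvCell m (r - 1) c + pvCell m r (c - 1) + pvCell m r (c + 1) + pvCell m (r + 1) c +
      pvCell m (r - 1) (c - 1) + pvCell m (r + 1) (c + 1) + pvCell m (r - 1) (c + 1) +
      pvCell m (r + 1) (c - 1) := by
  unfold sum_adj_alt
  simp only [List.foldl_cons, List.foldl_nil]
  rw [pvStep, pvStep, pvStep, pvStep, pvStep, pvStep, pvStep, pvStep]
  simp only [show r + -1 = r - 1 from by ring, show c + -1 = c - 1 from by ring,
    show r + 0 = r from by ring, show c + 0 = c from by ring]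
  ring

-- the clamped range is the in-bounds part of {t-1, t, t+1}
theorem pvRangeClip (t n : Int) :
    PySem.List.pyRange (max 0 (t - 1)) (min n (t + 2)) 1 =
      (([t - 1, t, t + 1] : List Int).filter (fun x => decide (0 ≤ x ∧ x < n))) := by
  have h3 : (([t - 1, t, t + 1] : List Int)).Nodup := by
    simp [List.nodup_cons]; omega
  refine List.Perm.eq_of_pairwise (le := fun a b => a < b) ?_ ?_ ?_ ?_
  · intro a b _ _ hab hba; omega
  · exact PySem.List.pairwise_lt_pyRange_one _ _
  · refine List.Pairwise.filter _ ?_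
    refine List.Pairwise.cons ?_ (List.Pairwise.cons ?_ (List.Pairwise.cons ?_ List.Pairwise.nil))
    · intro b hb
      rcases List.mem_cons.mp hb with h | hb2
      · omega
      rcases List.mem_cons.mp hb2 with h | hb3
      · omega
      · exact absurd hb3 (List.not_mem_nil)
    · intro b hb
      rcases List.mem_cons.mp hb with h | hb2
      · omega
      · exact absurd hb2 (List.not_mem_nil)
    · intro b hb
      exact absurd hb (List.not_mem_nil)
  · refine (List.perm_ext_iff_of_nodup (PySem.List.nodup_pyRange_one _ _) (h3.filter _)).2 ?_
    intro a
    simp only [PySem.List.mem_pyRange_one, List.mem_filter, List.mem_cons, List.not_mem_nil,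
      or_false, decide_eq_true_eq]
    omega

theorem pvFoldFilter3 (g : Int → Int) (n a t : Int) :
    ((([t - 1, t, t + 1] : List Int).filter (fun x => decide (0 ≤ x ∧ x < n))).foldl
        (fun acc i => acc + g i) a) =
      a + (if 0 ≤ t - 1 ∧ t - 1 < n then g (t - 1) else 0) +
        (if 0 ≤ t ∧ t < n then g t else 0) +
        (if 0 ≤ t + 1 ∧ t + 1 < n then g (t + 1) else 0) := by
  simp only [List.filter_cons, List.filter_nil, decide_eq_true_eq]
  split_ifs <;> simp only [List.foldl_cons, List.foldl_nil] <;> ring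

theorem pvBlock (g : Int → Int) (n a t : Int) :
    ((PySem.List.pyRange (max 0 (t - 1)) (min n (t + 2)) 1).foldl (fun acc i => acc + g i) a) =
      a + (if 0 ≤ t - 1 ∧ t - 1 < n then g (t - 1) else 0) +
        (if 0 ≤ t ∧ t < n then g t else 0) +
        (if 0 ≤ t + 1 ∧ t + 1 < n then g (t + 1) else 0) := by
  rw [pvRangeClip, pvFoldFilter3]

-- a cell with an out-of-range row index contributes 0
theorem pvCellRowOut (m : List (List Int)) (i j : Int) (h : ¬ (0 ≤ i ∧ i < (m.length : Int))) :
    pvCell m i j = 0 := by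
  unfold pvCell
  (split_ifs; rfl)

theorem pvCellIn (m : List (List Int)) (i j : Int)
    (h : 0 ≤ i ∧ i < (m.length : Int) ∧ 0 ≤ j ∧ j < pvNC m) :
    pvCell m i j = PySem.List.pyGetD (PySem.List.pyGetD m i []) j 0 := by
  unfold pvCell
  revert h; generalize pvNC m = w; intro h
  split_ifs <;> first | rfl | (exfalso; omega)

theorem pvCellOut (m : List (List Int)) (i j : Int)
    (h : ¬ (0 ≤ i ∧ i < (m.length : Int) ∧ 0 ≤ j ∧ j < pvNC m)) :
    pvCell m i j = 0 := by
  unfold pvCell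
  revert h; generalize pvNC m = w; intro h
  split_ifs <;> first | rfl | (exfalso; omega)

-- the inner column loop over a row that is in range adds the three cells of that row
theorem pvRow (m : List (List Int)) (c i acc : Int) (hrow : 0 ≤ i ∧ i < (m.length : Int)) :
    ((PySem.List.pyRange (max 0 (c - 1)) (min (pvNC m) (c + 2)) 1).foldl
        (fun acc2 j => acc2 + PySem.List.pyGetD (PySem.List.pyGetD m i []) j 0) acc) =
      acc + (pvCell m i (c - 1) + pvCell m i c + pvCell m i (c + 1)) := by
  rw [pvBlock]
  unfold pvCell
  revert hrow; generalize pvNC m = w; intro hrow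
  split_ifs <;> ring1

theorem pvB_eq (m : List (List Int)) (r c : Int) :
    sum_adj_alt_alt m r c =
      (pvCell m (r - 1) (c - 1) + pvCell m (r - 1) c + pvCell m (r - 1) (c + 1) +
       pvCell m r (c - 1) + pvCell m r c + pvCell m r (c + 1) +
       pvCell m (r + 1) (c - 1) + pvCell m (r + 1) c + pvCell m (r + 1) (c + 1)) -
      pvCell m r c := by
  unfold sum_adj_alt_alt
  have hcong :
      ((PySem.List.pyRange (max 0 (r - 1)) (min (m.length : Int) (r + 2)) 1).foldl
        (fun acc i =>
          (PySem.List.pyRange (max 0 (c - 1)) (min (pvNC m) (c + 2)) 1).foldl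
            (fun acc2 j => acc2 + PySem.List.pyGetD (PySem.List.pyGetD m i []) j 0) acc) 0) =
      ((PySem.List.pyRange (max 0 (r - 1)) (min (m.length : Int) (r + 2)) 1).foldl
        (fun acc i => acc + (pvCell m i (c - 1) + pvCell m i c + pvCell m i (c + 1))) 0) := by
    apply PySem.List.foldl_congr_mem
    intro acc i hmem
    rw [PySem.List.mem_pyRange_one] at hmem
    refine pvRow m c i acc ⟨by omega, by omega⟩
  simp only [hcong]
  rw [pvBlock]
  have hrowif : ∀ i : Int,
      (if 0 ≤ i ∧ i < (m.length : Int) then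
          pvCell m i (c - 1) + pvCell m i c + pvCell m i (c + 1) else 0) =
        pvCell m i (c - 1) + pvCell m i c + pvCell m i (c + 1) := by
    intro i
    split_ifs with h
    · rfl
    · rw [pvCellRowOut m i (c - 1) h, pvCellRowOut m i c h, pvCellRowOut m i (c + 1) h]; ring
  rw [hrowif, hrowif, hrowif]
  split_ifs with h
  · rw [pvCellIn m r c ⟨h.1, h.2.1, h.2.2.1, h.2.2.2⟩]; ring
  · rw [pvCellOut m r c h]; ring

-- ===== VERDICT (by name: the statement is the Claim_ definition above) =====
theorem sum_adj_alt_spec : Claim_equal_sum_adj_alt := by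
  intro m r c _ _
  unfold Spec_sum_adj_alt
  rw [pvA_eq, pvB_eq]
  ring
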